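-- pv_equiv track=rewrite | github.com/Met2348/abr | scripts/phase_f_grpo_lite.py | _split_steps
-- ===== SOURCE A (Python) =====
-- def _split_steps(text: str) -> list[str]:
--     """Return cumulative step prefixes for PRM scoring."""
--     parts = [p.strip() for p in text.split("\n\n") if p.strip()]
--     if not parts:
--         return [text.strip()]
--     prefixes: list[str] = []
--     cumulative = ""
--     for part in parts:
--         cumulative = (cumulative + "\n\n" + part).lstrip("\n")
--         prefixes.append(cumulative)
--     return prefixes
-- ===== SOURCE B (Python) =====
-- def _split_steps(text: str) -> list[str]:
--     """Return cumulative step prefixes for PRM scoring."""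
--     parts = [p.strip() for p in text.split("\n\n") if p.strip()]
--     if not parts:
--         return [text.strip()]
--     return ["\n\n".join(parts[:i + 1]) for i in range(len(parts))]
-- ===== Notes on version B (the rewrite author's own statement) =====
-- stated objective: simpler
-- what changed: B drops A's running cumulative string and its lstrip step and instead builds each prefix directly by joining the slice parts[:i+1] with the paragraph separator.
import Mathlib
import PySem

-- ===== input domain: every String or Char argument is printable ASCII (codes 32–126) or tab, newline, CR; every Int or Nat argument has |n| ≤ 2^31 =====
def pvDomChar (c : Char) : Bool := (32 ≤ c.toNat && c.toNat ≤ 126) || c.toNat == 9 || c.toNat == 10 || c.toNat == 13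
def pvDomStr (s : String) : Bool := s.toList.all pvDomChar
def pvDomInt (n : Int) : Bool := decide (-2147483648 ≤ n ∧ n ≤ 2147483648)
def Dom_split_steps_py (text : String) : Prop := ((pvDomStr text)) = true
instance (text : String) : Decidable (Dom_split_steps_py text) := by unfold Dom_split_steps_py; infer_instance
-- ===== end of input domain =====

-- B (simpler): each prefix is joined directly from its slice of `parts`; no running
-- cumulative string and no lstrip step are maintained.

-- shared by both ports: parts = [p.strip() for p in text.split("\n\n") if p.strip()]
-- (the separator is the nonempty literal "\n\n", so split? is always `some`)
def pvParts (text : String) : List String :=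
  (((PySem.Str.split? text "\n\n").getD []).map PySem.Str.strip).filter (· ≠ "")

-- ===== PORT A =====
-- cumulative.lstrip("\n"): exact hand port of str.lstrip with the explicit char set {'\n'}
def pvLstripNL (s : String) : String := String.ofList (s.toList.dropWhile (· == '\n'))

def split_steps_py (text : String) : List String :=
  let parts := pvParts text
  if parts = [] then [PySem.Str.strip text]
  else
    (parts.foldl
      (fun (st : List String × String) part =>
        let cumulative := pvLstripNL (st.2 ++ "\n\n" ++ part)
        (st.1 ++ [cumulative], cumulative))
      ([], "")).1

-- ===== PORT B =====
def split_steps_py_alt (text : String) : List String :=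
  let parts := pvParts text
  if parts = [] then [PySem.Str.strip text]
  else (List.range parts.length).map (fun i => PySem.Str.join "\n\n" (parts.take (i + 1)))

-- ===== PRECONDITION & SPEC =====
def Spec_split_steps_py (text : String) (out : List String) : Prop := out = split_steps_py_alt text
instance (text : String) (out : List String) : Decidable (Spec_split_steps_py text out) := by unfold Spec_split_steps_py; infer_instance

-- ===== CLAIM (what is proved, stated in full; the proofs are below) =====
def Claim_equal_split_steps_py : Prop := ∀ (text : String), Dom_split_steps_py text → Spec_split_steps_py text (split_steps_py text)

-- ===== LEMMAS AND PROOFS =====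

lemma dw_head (p : Char → Bool) (l t : List Char) (a : Char) (h : l.dropWhile p = a :: t) :
    p a = false := by
  have hne : l.dropWhile p ≠ [] := by simp [h]
  have h2 := List.head_dropWhile_not p (l := l) hne
  simp only [h, List.head_cons] at h2
  exact h2

-- a nonempty stripped string starts with a non-whitespace character (in particular not '\n')
lemma strip_head_not_nl (q : String) (h : PySem.Str.strip q ≠ "") :
    ∃ a t, (PySem.Str.strip q).toList = a :: t ∧ (a == '\n') = false := by
  have htl : (PySem.Str.strip q).toList = PySem.Chars.strip q.toList := PySem.Str.toList_strip q
  have hne : PySem.Chars.strip q.toList ≠ [] := by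
    intro h0
    apply h
    apply String.toList_inj.mp
    rw [htl, h0]
    rfl
  obtain ⟨a, t, hcons⟩ := List.exists_cons_of_ne_nil hne
  refine ⟨a, t, by rw [htl, hcons], ?_⟩
  have hpre : PySem.Chars.strip q.toList <+: List.dropWhile PySem.Chars.isspace q.toList := by
    rw [PySem.Chars.strip, PySem.Chars.rstrip, PySem.Chars.lstrip]
    conv_rhs => rw [← List.reverse_reverse (List.dropWhile PySem.Chars.isspace q.toList)]
    exact List.reverse_prefix.mpr (List.dropWhile_suffix _)
  obtain ⟨rest, hrest⟩ := hpre
  rw [hcons, List.cons_append] at hrest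
  have hsp : PySem.Chars.isspace a = false := dw_head _ _ _ _ hrest.symm
  have hann : a ≠ '\n' := by
    intro e
    rw [e] at hsp
    exact absurd hsp (by decide)
  simpa using hann

-- pvLstripNL is the identity on strings whose first character is not '\n'
lemma lstripNL_id (s : String) (a : Char) (t : List Char)
    (h : s.toList = a :: t) (ha : (a == '\n') = false) : pvLstripNL s = s := by
  have : s.toList.dropWhile (· == '\n') = s.toList := by
    rw [h, List.dropWhile_cons, ha]; simp
  rw [pvLstripNL, this, String.ofList_toList]

-- absorbing an already-joined head into the join
lemma join_merge (c p : String) (l : List String) :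
    PySem.Str.join "\n\n" ((c ++ "\n\n" ++ p) :: l) = PySem.Str.join "\n\n" (c :: p :: l) := by
  apply String.toList_inj.mp
  cases l with
  | nil =>
      simp [PySem.Str.toList_join, PySem.Chars.join_singleton, PySem.Chars.join_cons_cons,
        String.toList_append]
  | cons y ys =>
      simp [PySem.Str.toList_join, PySem.Chars.join_cons_cons, String.toList_append,
        List.append_assoc]

lemma join_one (p : String) : PySem.Str.join "\n\n" [p] = p := by
  apply String.toList_inj.mp
  simp [PySem.Str.toList_join, PySem.Chars.join_singleton]

lemma join_pair (c p : String) :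
    PySem.Str.join "\n\n" [c, p] = c ++ "\n\n" ++ p := by
  apply String.toList_inj.mp
  simp [PySem.Str.toList_join, PySem.Chars.join_cons_cons, PySem.Chars.join_singleton,
    String.toList_append]

-- the loop invariant of A's fold: once the cumulative string starts with a non-'\n'
-- character, each further step just appends, and the collected prefixes are slice-joins
lemma fold_invariant (ps : List String) (acc : List String) (c : String)
    (a : Char) (t : List Char) (hc : c.toList = a :: t) (ha : (a == '\n') = false) :
    (ps.foldl
      (fun (st : List String × String) part =>
        (st.1 ++ [pvLstripNL (st.2 ++ "\n\n" ++ part)], pvLstripNL (st.2 ++ "\n\n" ++ part)))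
      (acc, c)).1
    = acc ++ (List.range ps.length).map
        (fun i => PySem.Str.join "\n\n" (c :: ps.take (i + 1))) := by
  induction ps generalizing acc c a t with
  | nil => simp
  | cons p ps ih =>
      have hcat : (c ++ "\n\n" ++ p).toList = a :: (t ++ "\n\n".toList ++ p.toList) := by
        simp [String.toList_append, hc]
      have hid : pvLstripNL (c ++ "\n\n" ++ p) = c ++ "\n\n" ++ p :=
        lstripNL_id _ _ _ hcat ha
      simp only [List.foldl_cons, hid]
      rw [ih (acc ++ [c ++ "\n\n" ++ p]) (c ++ "\n\n" ++ p) a _ hcat ha]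
      rw [List.length_cons, List.range_succ_eq_map, List.map_cons, List.map_map]
      simp only [List.take_succ_cons, List.take_zero, Function.comp_def, join_pair,
        Nat.succ_eq_add_one]
      rw [List.map_congr_left
        (fun i _ => (join_merge c p (ps.take (i + 1))).symm :
          ∀ i ∈ List.range ps.length,
            PySem.Str.join "\n\n" (c :: p :: ps.take (i + 1)) =
            PySem.Str.join "\n\n" ((c ++ "\n\n" ++ p) :: ps.take (i + 1)))]
      simp [List.append_assoc]

-- ===== VERDICT (by name: the statement is the Claim_ definition above) =====
theorem split_steps_py_spec : Claim_equal_split_steps_py := by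
  intro text _
  unfold Spec_split_steps_py split_steps_py split_steps_py_alt
  cases hps : pvParts text with
  | nil => simp
  | cons p ps =>
      have hp : ∃ a t, p.toList = a :: t ∧ (a == '\n') = false := by
        have hmem : p ∈ pvParts text := by rw [hps]; exact List.mem_cons_self
        rw [pvParts] at hmem
        have := List.mem_filter.mp hmem
        have hne : p ≠ "" := by simpa using this.2
        obtain ⟨q, _, rfl⟩ := List.mem_map.mp this.1
        exact strip_head_not_nl q hne
      obtain ⟨a, t, hpt, hane⟩ := hp
      have hfirst : pvLstripNL ("" ++ "\n\n" ++ p) = p := by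
        have h2 : ("" ++ "\n\n" ++ p).toList = '\n' :: '\n' :: p.toList := by
          simp [String.toList_append]
        rw [pvLstripNL, h2]
        simp only [List.dropWhile_cons]
        norm_num
        rw [hpt, List.dropWhile_cons, hane]
        simp [← hpt]
      simp only [reduceCtorEq, if_false, List.foldl_cons, hfirst, List.nil_append]
      rw [fold_invariant ps [p] p a t hpt hane]
      rw [List.length_cons, List.range_succ_eq_map, List.map_cons, List.map_map]
      simp only [List.take_succ_cons, List.take_zero, Function.comp_def, join_one,
        Nat.succ_eq_add_one]
      simp
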